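-- pv_equiv track=rewrite | github.com/rusinmt/work_projects | Python/Computer Vision Anonymization/CV_table.py | crumb
-- ===== SOURCE A (Python) =====
-- def crumb(indexed_corners):
--     rows_dict = {}
--     for point, (col, row) in indexed_corners:
--         if row not in rows_dict:
--             rows_dict[row] = []
--         rows_dict[row].append((col, point))
--
--     paths = []
--     for row, points in sorted(rows_dict.items()):
--         points = sorted(points, key=lambda x: x[0])
--         paths.append([p[1] for p in points])
--     return paths
-- ===== SOURCE B (Python) =====
-- def crumb(indexed_corners):
--     # One global stable sort by (row, col), then one linear pass that slices
--     # the sorted flat list into runs of equal row.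
--     flat = sorted(((row, col, point) for point, (col, row) in indexed_corners),
--                   key=lambda t: (t[0], t[1]))
--     paths = []
--     i = 0
--     n = len(flat)
--     while i < n:
--         j = i
--         while j < n and flat[j][0] == flat[i][0]:
--             j += 1
--         paths.append([t[2] for t in flat[i:j]])
--         i = j
--     return paths
-- ===== Notes on version B (the rewrite author's own statement) =====
-- stated objective: alternative
-- what changed: Replaces A's dict-bucketing (group rows in a dict, then sort the row keys and each bucket separately) by one global stable sort of (row, col, point) triples followed by a single linear pass that slices the sorted flat list into runs of equal row.
import Mathlib
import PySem

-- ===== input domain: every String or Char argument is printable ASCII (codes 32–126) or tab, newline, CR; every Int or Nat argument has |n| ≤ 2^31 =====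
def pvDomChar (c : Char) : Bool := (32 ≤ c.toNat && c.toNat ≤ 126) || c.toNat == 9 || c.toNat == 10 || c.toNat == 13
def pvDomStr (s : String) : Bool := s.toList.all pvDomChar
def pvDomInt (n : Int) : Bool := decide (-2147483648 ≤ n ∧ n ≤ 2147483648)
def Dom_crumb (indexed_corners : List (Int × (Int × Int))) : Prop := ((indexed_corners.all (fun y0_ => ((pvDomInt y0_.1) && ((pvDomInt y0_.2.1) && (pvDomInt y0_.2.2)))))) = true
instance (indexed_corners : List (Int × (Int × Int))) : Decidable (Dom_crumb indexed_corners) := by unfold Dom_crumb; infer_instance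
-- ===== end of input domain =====

-- B replaces A's dict-bucketing + per-bucket sorts by one global stable sort of
-- (row, col, point) triples followed by a single linear pass slicing equal-row runs
-- (alternative decomposition; no speed claim).

-- ===== PORT A =====
def crumb (indexed_corners : List (Int × (Int × Int))) : List (List Int) :=
  -- the two-line idiom "if row not in d: d[row] = []; d[row].append(v)"
  -- is d[row] = d.get(row, []) + [v], i.e. Dict.modify row [] (· ++ [v])
  let rows_dict := indexed_corners.foldl
    (fun d x => d.modify x.2.2 [] (fun l => l ++ [(x.2.1, x.1)])) PySem.Dict.empty
  -- sorted(rows_dict.items()): the keys are distinct, so Python's tuple comparison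
  -- is decided by the row alone; ported as a sort by the first component
  let its := PySem.List.sorted rows_dict.items (fun kv => kv.1) false
  its.foldl (fun paths kv =>
    paths ++ [((PySem.List.sorted kv.2 (fun p => p.1) false).map (fun p => p.2))]) []

-- ===== PORT B =====
-- the outer while-loop of Source B: slice the sorted flat list into runs of equal row
def crumbGroup : List (Int × Int × Int) → List (List Int)
  | [] => []
  | t :: rest =>
    (t.2.2 :: (rest.takeWhile (fun u => u.1 == t.1)).map (fun u => u.2.2))
      :: crumbGroup (rest.dropWhile (fun u => u.1 == t.1))
termination_by l => l.length
decreasing_by simpa using Nat.lt_succ_of_le (List.length_dropWhile_le _ rest)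

def crumb_alt (indexed_corners : List (Int × (Int × Int))) : List (List Int) :=
  let flat := PySem.List.sorted2 (indexed_corners.map (fun x => (x.2.2, x.2.1, x.1)))
    (fun t => t.1) (fun t => t.2.1) false
  crumbGroup flat

-- ===== PRECONDITION & SPEC =====
def Spec_crumb (indexed_corners : List (Int × (Int × Int))) (out : List (List Int)) : Prop := out = crumb_alt indexed_corners
instance (indexed_corners : List (Int × (Int × Int))) (out : List (List Int)) : Decidable (Spec_crumb indexed_corners out) := by unfold Spec_crumb; infer_instance

-- ===== CLAIM (what is proved, stated in full; the proofs are below) =====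
def Claim_equal_crumb : Prop := ∀ (indexed_corners : List (Int × (Int × Int))), Dom_crumb indexed_corners → Spec_crumb indexed_corners (crumb indexed_corners)

-- ===== LEMMAS AND PROOFS =====

-- comparators and the canonical (sorted-and-grouped) form, proof-side only
def pvLex (a b : Int × Int × Int) : Bool :=
  decide (a.1 < b.1) || (!decide (b.1 < a.1) && decide (a.2.1 < b.2.1))

def pvCol (a b : Int × Int × Int) : Bool := decide (a.2.1 < b.2.1)

def pvRows (l : List (Int × Int × Int)) : List Int :=
  PySem.List.sorted (PySem.Set.ofList (l.map (fun t => t.1))) (fun x => x) false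

def pvChunk (l : List (Int × Int × Int)) (k : Int) : List (Int × Int × Int) :=
  PySem.List.sorted (l.filter (fun t => t.1 == k)) (fun t => t.2.1) false

def pvCanon (l : List (Int × Int × Int)) : List (Int × Int × Int) :=
  (pvRows l).flatMap (fun k => pvChunk l k)

theorem pv_sorted2_eq_foldl (l : List (Int × Int × Int)) :
    PySem.List.sorted2 l (fun t => t.1) (fun t => t.2.1) false
      = l.foldl (fun acc x => PySem.List.insertBy pvLex x acc) [] := rfl

theorem pv_insertBy_append_of_false {α : Type} (before : α → α → Bool) (x : α)
    (s t : List α) (h : ∀ y ∈ s, before x y = false) :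
    PySem.List.insertBy before x (s ++ t) = s ++ PySem.List.insertBy before x t := by
  induction s with
  | nil => simp
  | cons y ys ih =>
    simp [PySem.List.insertBy, h y (by simp), ih (fun z hz => h z (by simp [hz]))]

theorem pv_insertBy_map {α β : Type} (g : α → β) (ba : α → α → Bool) (bb : β → β → Bool)
    (h : ∀ a b, bb (g a) (g b) = ba a b) (x : α) (s : List α) :
    PySem.List.insertBy bb (g x) (s.map g) = (PySem.List.insertBy ba x s).map g := by
  induction s with
  | nil => simp [PySem.List.insertBy]
  | cons y ys ih =>
    simp only [List.map_cons, PySem.List.insertBy, h x y]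
    cases hb : ba x y <;> simp [ih]

theorem pv_sorted_map {α β κ : Type} [LinearOrder κ] (g : α → β) (key : β → κ) (l : List α) :
    PySem.List.sorted (l.map g) key false
      = (PySem.List.sorted l (fun a => key (g a)) false).map g := by
  simp only [PySem.List.sorted, if_neg (by simp : ¬ (false = true)), List.foldl_map]
  suffices h : ∀ acc : List α,
      l.foldl (fun acc a => PySem.List.insertBy (fun a b => decide (key a < key b)) (g a) acc) (acc.map g)
        = (l.foldl (fun acc a => PySem.List.insertBy (fun a b => decide (key (g a) < key (g b))) a acc) acc).map g by
    simpa using h []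
  induction l with
  | nil => intro acc; simp
  | cons a t ih =>
    intro acc
    simp only [List.foldl_cons]
    rw [pv_insertBy_map g (fun a b => decide (key (g a) < key (g b))) (fun a b => decide (key a < key b)) (fun _ _ => rfl)]
    exact ih _

theorem pv_sorted_append_singleton {α κ : Type} [LinearOrder κ] (key : α → κ) (m : List α) (x : α) :
    PySem.List.sorted (m ++ [x]) key false
      = PySem.List.insertBy (fun a b => decide (key a < key b)) x (PySem.List.sorted m key false) := by
  simp [PySem.List.sorted, List.foldl_append]

theorem pv_chunk_row (l : List (Int × Int × Int)) (k : Int) :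
    ∀ u ∈ pvChunk l k, u.1 = k := by
  intro u hu
  rw [pvChunk, PySem.List.mem_sorted] at hu
  have := List.of_mem_filter hu
  simpa using this

theorem pv_chunk_ne_nil (l : List (Int × Int × Int)) (k : Int) (hk : k ∈ pvRows l) :
    pvChunk l k ≠ [] := by
  rw [pvRows, PySem.List.mem_sorted, PySem.Set.mem_ofList, List.mem_map] at hk
  obtain ⟨u, hu, huk⟩ := hk
  rw [pvChunk, Ne, PySem.List.sorted_eq_nil_iff, List.filter_eq_nil_iff]
  intro h
  exact h u hu (by simp [huk])

theorem pv_rows_pairwise (l : List (Int × Int × Int)) : (pvRows l).Pairwise (· < ·) :=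
  PySem.List.sorted_ofList_pairwise_lt _

theorem pv_insert_into_chunk (x : Int × Int × Int) (c rest : List (Int × Int × Int))
    (hc : ∀ u ∈ c, u.1 = x.1) (hr : ∀ u ∈ rest, x.1 < u.1) :
    PySem.List.insertBy pvLex x (c ++ rest) = PySem.List.insertBy pvCol x c ++ rest := by
  induction c with
  | nil =>
    cases rest with
    | nil => simp [PySem.List.insertBy]
    | cons u us =>
      have : pvLex x u = true := by simp [pvLex, hr u (by simp)]
      simp [PySem.List.insertBy, this]
  | cons y ys ih =>
    have hy : y.1 = x.1 := hc y (by simp)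
    have hlex : pvLex x y = pvCol x y := by simp [pvLex, pvCol, hy]
    cases hb : pvCol x y with
    | true => simp [PySem.List.insertBy, hlex, hb]
    | false =>
      simp [PySem.List.insertBy, hlex, hb, ih (fun z hz => hc z (by simp [hz]))]

theorem pv_insert_flatMap_mem (x : Int × Int × Int) :
    ∀ (rs : List Int) (chunk : Int → List (Int × Int × Int)),
    rs.Pairwise (· < ·) → (∀ k, ∀ u ∈ chunk k, u.1 = k) → (∀ k ∈ rs, chunk k ≠ []) →
    x.1 ∈ rs →
    PySem.List.insertBy pvLex x (rs.flatMap chunk)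
      = rs.flatMap (fun k => if k = x.1 then PySem.List.insertBy pvCol x (chunk k) else chunk k) := by
  intro rs
  induction rs with
  | nil => intro chunk _ _ _ hx; simp at hx
  | cons r rt ih =>
    intro chunk hp hrow hne hx
    have hpt := (List.pairwise_cons.mp hp).2
    have hr_lt : ∀ k ∈ rt, r < k := (List.pairwise_cons.mp hp).1
    simp only [List.flatMap_cons]
    by_cases hxr : x.1 = r
    · -- insert into this run
      have hrest : ∀ u ∈ rt.flatMap chunk, x.1 < u.1 := by
        intro u hu
        obtain ⟨k, hk, huk⟩ := List.mem_flatMap.mp hu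
        rw [hrow k u huk, hxr]
        exact hr_lt k hk
      rw [pv_insert_into_chunk x (chunk r) _ (fun u hu => (hrow r u hu).trans hxr.symm) hrest]
      have : ∀ k ∈ rt, (if k = x.1 then PySem.List.insertBy pvCol x (chunk k) else chunk k) = chunk k := by
        intro k hk
        have : k ≠ x.1 := by have := hr_lt k hk; omega
        simp [this]
      rw [if_pos hxr.symm, List.flatMap_congr this]
    · -- skip this run
      have hx' : x.1 ∈ rt := by
        rcases List.mem_cons.mp hx with h | h
        · exact absurd h hxr
        · exact h
      have hrx : r < x.1 := hr_lt _ hx'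
      have hfalse : ∀ u ∈ chunk r, pvLex x u = false := by
        intro u hu
        have : u.1 = r := hrow r u hu
        simp [pvLex, this]
        constructor
        · omega
        · intro h; omega
      rw [pv_insertBy_append_of_false _ _ _ _ hfalse, ih chunk hpt hrow (fun k hk => hne k (by simp [hk])) hx']
      have : ¬ (r = x.1) := by omega
      simp [this]

theorem pv_insert_flatMap_not_mem (x : Int × Int × Int) :
    ∀ (rs : List Int) (chunk : Int → List (Int × Int × Int)),
    rs.Pairwise (· < ·) → (∀ k, ∀ u ∈ chunk k, u.1 = k) → (∀ k ∈ rs, chunk k ≠ []) →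
    x.1 ∉ rs →
    PySem.List.insertBy pvLex x (rs.flatMap chunk)
      = (PySem.List.insertBy (fun a b => decide (a < b)) x.1 rs).flatMap
          (fun k => if k = x.1 then [x] else chunk k) := by
  intro rs
  induction rs with
  | nil => intro chunk _ _ _ _; simp [PySem.List.insertBy]
  | cons r rt ih =>
    intro chunk hp hrow hne hx
    have hpt := (List.pairwise_cons.mp hp).2
    have hr_lt : ∀ k ∈ rt, r < k := (List.pairwise_cons.mp hp).1
    have hxr : x.1 ≠ r := fun h => hx (by simp [h])
    have hxrt : x.1 ∉ rt := fun h => hx (by simp [h])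
    simp only [List.flatMap_cons]
    by_cases hlt : x.1 < r
    · -- x opens a new run in front
      obtain ⟨u, us, hcu⟩ : ∃ u us, chunk r = u :: us := by
        rcases hcr : chunk r with _ | ⟨u, us⟩
        · exact absurd hcr (hne r (by simp))
        · exact ⟨u, us, rfl⟩
      have hu1 : u.1 = r := hrow r u (by simp [hcu])
      have hlex : pvLex x u = true := by simp [pvLex, hu1]; omega
      have h1 : PySem.List.insertBy pvLex x (chunk r ++ rt.flatMap chunk)
          = x :: (chunk r ++ rt.flatMap chunk) := by
        rw [hcu]; simp [PySem.List.insertBy, hlex]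
      have h2 : PySem.List.insertBy (fun a b => decide (a < b)) x.1 (r :: rt) = x.1 :: r :: rt := by
        simp [PySem.List.insertBy, hlt]
      rw [h1, h2]
      have hall : ∀ k ∈ rt, (if k = x.1 then [x] else chunk k) = chunk k := by
        intro k hk
        have : k ≠ x.1 := by have := hr_lt k hk; omega
        simp [this]
      rw [List.flatMap_cons, List.flatMap_cons, if_pos rfl,
        if_neg (by omega : ¬ (r = x.1)), List.flatMap_congr hall]
      simp
    · -- r < x.1 : skip this run
      have hrx : r < x.1 := by omega
      have hfalse : ∀ u ∈ chunk r, pvLex x u = false := by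
        intro u hu
        have : u.1 = r := hrow r u hu
        simp [pvLex, this]
        exact ⟨by omega, fun h => by omega⟩
      rw [pv_insertBy_append_of_false _ _ _ _ hfalse,
        ih chunk hpt hrow (fun k hk => hne k (by simp [hk])) hxrt]
      have h2 : PySem.List.insertBy (fun a b => decide (a < b)) x.1 (r :: rt)
          = r :: PySem.List.insertBy (fun a b => decide (a < b)) x.1 rt := by
        simp [PySem.List.insertBy]; omega
      rw [h2]
      simp only [List.flatMap_cons, if_neg (by omega : ¬ (r = x.1))]

-- rows / runs of l ++ [x]
theorem pv_rows_append_mem (l : List (Int × Int × Int)) (x : Int × Int × Int)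
    (hx : x.1 ∈ l.map (fun t => t.1)) : pvRows (l ++ [x]) = pvRows l := by
  unfold pvRows
  rw [List.map_append, List.map_singleton, PySem.Set.ofList_append_singleton]
  have : (PySem.Set.ofList (l.map (fun t => t.1))).contains x.1 = true := by
    rw [PySem.Set.contains, List.contains_iff_mem]
    exact (PySem.Set.mem_ofList _ _).mpr hx
  rw [PySem.Set.add, if_pos this]

theorem pv_rows_append_not_mem (l : List (Int × Int × Int)) (x : Int × Int × Int)
    (hx : x.1 ∉ l.map (fun t => t.1)) :
    pvRows (l ++ [x]) = PySem.List.insertBy (fun a b => decide (a < b)) x.1 (pvRows l) := by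
  unfold pvRows
  rw [List.map_append, List.map_singleton, PySem.Set.ofList_append_singleton]
  have : (PySem.Set.ofList (l.map (fun t => t.1))).contains x.1 = false := by
    rw [PySem.Set.contains]
    rw [Bool.eq_false_iff]
    intro h
    exact hx ((PySem.Set.mem_ofList _ _).mp (List.contains_iff_mem.mp h))
  rw [PySem.Set.add, this]
  simp only [Bool.false_eq_true, if_false]
  exact pv_sorted_append_singleton (fun x => x) _ _

theorem pv_chunk_append_self (l : List (Int × Int × Int)) (x : Int × Int × Int) :
    pvChunk (l ++ [x]) x.1 = PySem.List.insertBy pvCol x (pvChunk l x.1) := by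
  unfold pvChunk
  rw [List.filter_append]
  have : List.filter (fun t => t.1 == x.1) [x] = [x] := by simp
  rw [this]
  unfold pvCol
  exact pv_sorted_append_singleton (fun t : Int × Int × Int => t.2.1) _ x

theorem pv_chunk_append_ne (l : List (Int × Int × Int)) (x : Int × Int × Int) (k : Int)
    (hk : k ≠ x.1) : pvChunk (l ++ [x]) k = pvChunk l k := by
  unfold pvChunk
  rw [List.filter_append]
  have : List.filter (fun t => t.1 == k) [x] = [] := by simp [Ne.symm hk]
  rw [this, List.append_nil]

-- the global lexicographic sort equals the canonical grouped form
theorem pv_sorted2_eq_canon (l : List (Int × Int × Int)) :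
    PySem.List.sorted2 l (fun t => t.1) (fun t => t.2.1) false = pvCanon l := by
  induction l using List.reverseRecOn with
  | nil => rfl
  | append_singleton m x ih =>
    rw [pv_sorted2_eq_foldl, List.foldl_append, List.foldl_cons, List.foldl_nil,
      ← pv_sorted2_eq_foldl, ih]
    by_cases hx : x.1 ∈ m.map (fun t => t.1)
    · have hxr : x.1 ∈ pvRows m := by
        rw [pvRows, PySem.List.mem_sorted, PySem.Set.mem_ofList]; exact hx
      rw [pvCanon, pv_insert_flatMap_mem x (pvRows m) (pvChunk m)
        (pv_rows_pairwise m) (pv_chunk_row m) (pv_chunk_ne_nil m) hxr]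
      unfold pvCanon
      rw [pv_rows_append_mem m x hx]
      apply List.flatMap_congr
      intro k _
      by_cases hk : k = x.1
      · subst hk
        rw [if_pos rfl, pv_chunk_append_self]
      · rw [if_neg hk, pv_chunk_append_ne m x k hk]
    · have hxr : x.1 ∉ pvRows m := by
        rw [pvRows, PySem.List.mem_sorted, PySem.Set.mem_ofList]; exact hx
      rw [pvCanon, pv_insert_flatMap_not_mem x (pvRows m) (pvChunk m)
        (pv_rows_pairwise m) (pv_chunk_row m) (pv_chunk_ne_nil m) hxr]
      unfold pvCanon
      rw [pv_rows_append_not_mem m x hx]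
      apply List.flatMap_congr
      intro k _
      by_cases hk : k = x.1
      · subst hk
        rw [if_pos rfl, pv_chunk_append_self]
        have h0 : pvChunk m x.1 = [] := by
          rw [pvChunk, PySem.List.sorted_eq_nil_iff, List.filter_eq_nil_iff]
          intro u hu hbeq
          exact hx (List.mem_map.mpr ⟨u, hu, by simpa using hbeq⟩)
        rw [h0]
        rfl
      · rw [if_neg hk, pv_chunk_append_ne m x k hk]

theorem pv_span_all {α : Type} (p : α → Bool) (us rest : List α)
    (h1 : ∀ a ∈ us, p a = true) (h2 : ∀ a ∈ rest, p a = false) :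
    (us ++ rest).takeWhile p = us ∧ (us ++ rest).dropWhile p = rest := by
  induction us with
  | nil =>
    constructor
    · cases rest with
      | nil => rfl
      | cons a t => simp [h2 a (by simp)]
    · cases rest with
      | nil => rfl
      | cons a t => simp [h2 a (by simp)]
  | cons a us ih =>
    have := ih (fun z hz => h1 z (by simp [hz]))
    simp [h1 a (by simp), this.1, this.2]

theorem pv_crumbGroup_flatMap :
    ∀ (rs : List Int) (chunk : Int → List (Int × Int × Int)),
    rs.Pairwise (· < ·) → (∀ k, ∀ u ∈ chunk k, u.1 = k) → (∀ k ∈ rs, chunk k ≠ []) →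
    crumbGroup (rs.flatMap chunk) = rs.map (fun k => (chunk k).map (fun t => t.2.2)) := by
  intro rs
  induction rs with
  | nil => intro chunk _ _ _; simp [crumbGroup]
  | cons r rt ih =>
    intro chunk hp hrow hne
    have hpt := (List.pairwise_cons.mp hp).2
    have hr_lt : ∀ k ∈ rt, r < k := (List.pairwise_cons.mp hp).1
    obtain ⟨u, us, hcu⟩ : ∃ u us, chunk r = u :: us := by
      rcases hcr : chunk r with _ | ⟨u, us⟩
      · exact absurd hcr (hne r (by simp))
      · exact ⟨u, us, rfl⟩
    have hu1 : u.1 = r := hrow r u (by simp [hcu])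
    have h1 : ∀ a ∈ us, (fun v => v.1 == u.1) a = true := by
      intro a ha
      simp [hrow r a (by simp [hcu, ha]), hu1]
    have h2 : ∀ a ∈ rt.flatMap chunk, (fun v => v.1 == u.1) a = false := by
      intro a ha
      obtain ⟨k, hk, hak⟩ := List.mem_flatMap.mp ha
      have := hr_lt k hk
      simp [hrow k a hak, hu1]
      omega
    have hspan := pv_span_all (fun v => v.1 == u.1) us (rt.flatMap chunk) h1 h2
    rw [List.flatMap_cons, hcu, List.cons_append, crumbGroup]
    rw [hspan.1, hspan.2, ih chunk hpt hrow (fun k hk => hne k (by simp [hk]))]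
    simp [hcu]

theorem pv_crumb_alt_eq (xs : List (Int × (Int × Int))) :
    crumb_alt xs = (pvRows (xs.map (fun x => (x.2.2, x.2.1, x.1)))).map
      (fun k => (pvChunk (xs.map (fun x => (x.2.2, x.2.1, x.1))) k).map (fun t => t.2.2)) := by
  unfold crumb_alt
  rw [pv_sorted2_eq_canon, pvCanon]
  exact pv_crumbGroup_flatMap _ _ (pv_rows_pairwise _) (pv_chunk_row _) (pv_chunk_ne_nil _)

theorem pv_crumb_eq (xs : List (Int × (Int × Int))) :
    crumb xs = (pvRows (xs.map (fun x => (x.2.2, x.2.1, x.1)))).map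
      (fun k => (pvChunk (xs.map (fun x => (x.2.2, x.2.1, x.1))) k).map (fun t => t.2.2)) := by
  unfold crumb
  set mp := xs.map (fun x => (x.2.2, x.2.1, x.1)) with hmpdef
  set d := xs.foldl (fun d x => d.modify x.2.2 [] (fun l => l ++ [(x.2.1, x.1)])) PySem.Dict.empty with hd
  have hmp : d = mp.foldl (fun d p => d.modify p.1 [] (fun l => l ++ [p.2])) PySem.Dict.empty := by
    rw [hd, hmpdef, List.foldl_map]
  have hupd : ∀ m : List Int, PySem.Set.update ([] : PySem.Set Int) m = PySem.Set.ofList m := by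
    intro m
    have h := PySem.Set.ofList_append [] m
    simpa [PySem.Set.ofList_nil] using h.symm
  have hkeys : d.keys = PySem.Set.ofList (mp.map (fun t => t.1)) := by
    rw [hmp]
    rw [PySem.Dict.keys_foldl_modify_key mp (fun p => p.1) [] (fun _ p l => l ++ [p.2]) PySem.Dict.empty]
    rw [PySem.Dict.keys_empty, hupd]
  have hnodup : d.keys.Nodup := by
    rw [hmp]
    exact PySem.Dict.nodup_keys_foldl_modify_key mp (fun p => p.1) [] (fun _ p l => l ++ [p.2])
      PySem.Dict.empty PySem.Dict.nodup_keys_empty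
  have hgetD : ∀ k, d.getD k [] = (mp.filter (fun p => p.1 == k)).map (fun p => p.2) := by
    intro k
    rw [hmp]
    have h := PySem.Dict.getD_foldl_modify_append mp PySem.Dict.empty k
    simpa [PySem.Dict.getD_empty] using h
  have hitems : d.items = d.keys.map (fun k => (k, d.getD k [])) :=
    PySem.Dict.items_eq_map_keys d hnodup []
  have hsorted : PySem.List.sorted d.items (fun kv => kv.1) false
      = (pvRows mp).map (fun k => (k, d.getD k [])) := by
    apply PySem.List.sorted_eq_of_perm_of_pairwise_lt
    · rw [hitems, hkeys]
      exact (PySem.List.sorted_perm _ _ _).map _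
    · exact List.pairwise_map.mpr (pv_rows_pairwise mp)
  rw [PySem.List.foldl_append_singleton_eq_map, List.nil_append, hsorted, List.map_map]
  apply List.map_congr_left
  intro k _
  simp only [Function.comp]
  rw [hgetD k]
  rw [pv_sorted_map (fun t : Int × Int × Int => t.2) (fun p : Int × Int => p.1)
    (mp.filter (fun p => p.1 == k)), List.map_map]
  rfl

-- ===== VERDICT (by name: the statement is the Claim_ definition above) =====
theorem crumb_spec : Claim_equal_crumb := by
  intro xs _
  unfold Spec_crumb
  rw [pv_crumb_eq, pv_crumb_alt_eq]
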